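-- pv_equiv track=rewrite | github.com/AdityaChaudhary2913/CodeForces | B_Make_it_Divisible_by_25.py | min_moves_for_candidate
-- ===== SOURCE A (Python) =====
-- def min_moves_for_candidate(s, candidate):
--     n = len(s)
--
--     moves = 0
--     pos_second = -1
--     for i in range(n - 1, -1, -1):
--         if s[i] == candidate[1]:
--             pos_second = i
--             break
--         else:
--             moves += 1
--     if pos_second == -1:
--         return 100
--
--     moves_second = 0
--     pos_first = -1
--     for j in range(pos_second - 1, -1, -1):
--         if s[j] == candidate[0]:
--             pos_first = j
--             break
--         else:
--             moves_second += 1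
--     if pos_first == -1:
--         return 100
--
--     return moves + moves_second
-- ===== SOURCE B (Python) =====
-- def min_moves_for_candidate(s, candidate):
--     c0, c1 = candidate[0], candidate[1]
--     best = -1
--     last0 = -1
--     for i, ch in enumerate(s):
--         if ch == c1:
--             best = last0
--         if ch == c0:
--             last0 = i
--     return 100 if best == -1 else len(s) - 2 - best
-- ===== Notes on version B (the rewrite author's own statement) =====
-- stated objective: alternative
-- what changed: A's two staged reverse scans (find last candidate[1], then scan backwards for candidate[0], adding up two move counters) are replaced by ONE forward pass over enumerate(s) maintaining two registers (last index of candidate[0] seen so far, and the best such index confirmed by a later candidate[1]), finishing with the closed-form count len(s)-2-best.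
-- outside the precondition, e.g. on min_moves_for_candidate('', 'a'): A returns 100, B raises IndexError; on min_moves_for_candidate('', ''): A returns 100, B raises IndexError
import Mathlib
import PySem

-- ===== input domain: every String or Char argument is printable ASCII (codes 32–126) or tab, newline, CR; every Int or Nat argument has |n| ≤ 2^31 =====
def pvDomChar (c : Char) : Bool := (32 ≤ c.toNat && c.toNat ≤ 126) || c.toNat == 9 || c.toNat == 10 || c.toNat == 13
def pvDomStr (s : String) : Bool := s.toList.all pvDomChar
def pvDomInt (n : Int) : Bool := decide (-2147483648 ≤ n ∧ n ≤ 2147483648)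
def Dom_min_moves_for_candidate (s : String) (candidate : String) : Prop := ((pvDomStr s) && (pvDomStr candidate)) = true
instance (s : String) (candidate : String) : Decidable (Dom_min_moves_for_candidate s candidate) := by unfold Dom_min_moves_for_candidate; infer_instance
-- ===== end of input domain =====

-- B replaces A's two staged reverse scans and incremental move counters by one forward
-- pass with two registers and the closed-form count len(s)-2-best (objective: alternative).


-- ===== PORT A =====
-- A's reverse loop 'for i in range(k-1,-1,-1): if s[i]==c: pos=i; break else moves+=1',
-- started at index k-1, carrying the moves accumulator. Under Pre_ every access is in
-- range, so l.getD i default is exactly Python's s[i]. Returns (moves, pos).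
def aLoop (l : List Char) (c : Char) (moves : Int) : Nat → Int × Int
  | 0 => (moves, -1)
  | Nat.succ k => if l.getD k default = c then (moves, (k : Int)) else aLoop l c (moves + 1) k

def min_moves_for_candidate (s : String) (candidate : String) : Int :=
  let cs := s.toList
  let n := cs.length
  match PySem.Str.pyGet? candidate 1 with
  | none => if n = 0 then 100 else 0
    -- n = 0: the loop body never runs, Python returns 100; n > 0: candidate[1] raises
    -- IndexError in Python (outside Pre_), value immaterial
  | some c1 =>
    let r1 := aLoop cs c1 0 n
    if r1.2 = -1 then 100
    else
      match PySem.Str.pyGet? candidate 0 with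
      | none => 0  -- unreachable under Pre_
      | some c0 =>
        let r2 := aLoop cs c0 0 r1.2.toNat
        if r2.2 = -1 then 100 else r1.1 + r2.1

-- ===== PORT B =====
-- Source B's forward 'for i, ch in enumerate(s)' loop, carrying (best, last0); i is the
-- running enumerate index.
def bLoop (c0 c1 : Char) : List Char → Nat → Int × Int → Int × Int
  | [], _, st => st
  | ch :: t, i, st =>
      bLoop c0 c1 t (i + 1)
        (if ch = c1 then st.2 else st.1, if ch = c0 then (i : Int) else st.2)

def min_moves_for_candidate_alt (s : String) (candidate : String) : Int :=
  let c0 := (PySem.Str.pyGet? candidate 0).getD default   -- candidate[0] (raises outside Pre_)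
  let c1 := (PySem.Str.pyGet? candidate 1).getD default   -- candidate[1] (raises outside Pre_)
  let st := bLoop c0 c1 s.toList 0 (-1, -1)
  if st.1 = -1 then 100 else (s.length : Int) - 2 - st.1

-- ===== PRECONDITION & SPEC =====
-- Pre_ excludes candidates shorter than 2 characters: there A raises IndexError whenever s
-- is nonempty, and on the remaining inputs (s empty) A returns 100 while B's own
-- candidate[0]/candidate[1] unpacking naturally raises IndexError, so they are excluded too.
def Pre_min_moves_for_candidate (s : String) (candidate : String) : Prop :=
  2 ≤ candidate.length
instance (s : String) (candidate : String) : Decidable (Pre_min_moves_for_candidate s candidate) := by unfold Pre_min_moves_for_candidate; infer_instance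

def pvWitness_min_moves_for_candidate : String × String := ("205", "25")

def Spec_min_moves_for_candidate (s : String) (candidate : String) (out : Int) : Prop := out = min_moves_for_candidate_alt s candidate
instance (s : String) (candidate : String) (out : Int) : Decidable (Spec_min_moves_for_candidate s candidate out) := by unfold Spec_min_moves_for_candidate; infer_instance

-- ===== CLAIM (what is proved, stated in full; the proofs are below) =====
def Claim_equal_min_moves_for_candidate : Prop := ∀ (s : String) (candidate : String), Dom_min_moves_for_candidate s candidate → Pre_min_moves_for_candidate s candidate → Spec_min_moves_for_candidate s candidate (min_moves_for_candidate s candidate)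

-- ===== LEMMAS AND PROOFS =====

-- the greatest index j < k with l[j]? = some c, as an Int, else -1
def lastIdx (l : List Char) (c : Char) : Nat → Int
  | 0 => -1
  | Nat.succ k => if l[k]? = some c then (k : Int) else lastIdx l c k

-- B's 'best' register after the first k characters
def bestSpec (l : List Char) (c0 c1 : Char) (k : Nat) : Int :=
  if lastIdx l c1 k = -1 then -1 else lastIdx l c0 (lastIdx l c1 k).toNat

lemma lastIdx_cases (l : List Char) (c : Char) (k : Nat) :
    lastIdx l c k = -1 ∨ (0 ≤ lastIdx l c k ∧ lastIdx l c k < k) := by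
  induction k with
  | zero => left; rfl
  | succ k ih =>
    simp only [lastIdx]
    split_ifs with h
    · right; refine ⟨by positivity, by push_cast; omega⟩
    · rcases ih with h1 | ⟨h1, h2⟩
      · left; exact h1
      · right; refine ⟨h1, by push_cast at h2 ⊢; omega⟩

lemma aLoop_spec (l : List Char) (c : Char) (m : Int) (k : Nat) (hk : k ≤ l.length) :
    aLoop l c m k =
      (if lastIdx l c k = -1 then m + k else m + (k - 1 - lastIdx l c k), lastIdx l c k) := by
  induction k generalizing m with
  | zero => simp [aLoop, lastIdx]
  | succ k ih =>
    have hk' : k < l.length := by omega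
    have hget : (l.getD k default = c) = (l[k]? = some c) := by
      simp [List.getD, List.getElem?_eq_getElem hk']
    by_cases h : l[k]? = some c
    · have hA : aLoop l c m (k + 1) = (m, (k : Int)) := by
        simp only [aLoop, hget, h, if_true]
      have hL : lastIdx l c (k + 1) = (k : Int) := by simp [lastIdx, h]
      rw [hA, hL, if_neg (by omega : ¬ ((k : Int) = -1))]
      simp only [Prod.mk.injEq]
      exact ⟨by push_cast; omega, trivial⟩
    · have hA : aLoop l c m (k + 1) = aLoop l c (m + 1) k := by
        simp only [aLoop, hget, h, if_false]
      have hL : lastIdx l c (k + 1) = lastIdx l c k := by simp [lastIdx, h]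
      rw [hA, hL, ih (m + 1) (by omega)]
      rcases lastIdx_cases l c k with h1 | ⟨h1, h2⟩
      · rw [if_pos h1, if_pos h1]
        simp only [Prod.mk.injEq]
        exact ⟨by push_cast; omega, trivial⟩
      · rw [if_neg (by omega : ¬ (lastIdx l c k = -1)), if_neg (by omega : ¬ (lastIdx l c k = -1))]
        simp only [Prod.mk.injEq]
        exact ⟨by push_cast; omega, trivial⟩

-- loop invariant for B's forward pass, advanced from position k to the end
lemma bLoop_inv (l : List Char) (c0 c1 : Char) (m : Nat) :
    ∀ k, k + m = l.length →
      bLoop c0 c1 (l.drop k) k (bestSpec l c0 c1 k, lastIdx l c0 k) =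
        (bestSpec l c0 c1 l.length, lastIdx l c0 l.length) := by
  induction m with
  | zero =>
    intro k hk
    have hk' : k = l.length := by omega
    subst hk'
    simp [bLoop]
  | succ m ih =>
    intro k hk
    have hlt : k < l.length := by omega
    rw [List.drop_eq_getElem_cons hlt]
    simp only [bLoop]
    have hstep :
        ((if l[k] = c1 then lastIdx l c0 k else bestSpec l c0 c1 k),
         (if l[k] = c0 then (k : Int) else lastIdx l c0 k)) =
        (bestSpec l c0 c1 (k + 1), lastIdx l c0 (k + 1)) := by
      have hsome : ∀ c : Char, (l[k]? = some c) = (l[k] = c) := by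
        intro c; simp [List.getElem?_eq_getElem hlt]
      have hL : ∀ c : Char,
          lastIdx l c (k + 1) = if l[k] = c then (k : Int) else lastIdx l c k := by
        intro c; simp [lastIdx, hsome]
      simp only [Prod.mk.injEq]
      refine ⟨?_, ?_⟩
      · by_cases h1 : l[k] = c1
        · have : lastIdx l c1 (k + 1) = (k : Int) := by rw [hL, if_pos h1]
          simp only [bestSpec, this, h1, if_true]
          rw [if_neg (by omega : ¬ ((k : Int) = -1))]
          simp
        · have : lastIdx l c1 (k + 1) = lastIdx l c1 k := by rw [hL, if_neg h1]
          simp only [bestSpec, this, h1, if_false]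
      · rw [hL]
    rw [hstep]
    exact ih (k + 1) (by omega)

lemma bLoop_full (l : List Char) (c0 c1 : Char) :
    bLoop c0 c1 l 0 (-1, -1) = (bestSpec l c0 c1 l.length, lastIdx l c0 l.length) := by
  have h0 : bestSpec l c0 c1 0 = -1 := by simp [bestSpec, lastIdx]
  have h1 : lastIdx l c0 0 = -1 := rfl
  have := bLoop_inv l c0 c1 l.length 0 (by omega)
  rw [h0, h1, List.drop_zero] at this
  exact this

-- ===== VERDICT (by name: the statement is the Claim_ definition above) =====
theorem min_moves_for_candidate_spec : Claim_equal_min_moves_for_candidate := by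
  intro s candidate _hdom hpre
  unfold Spec_min_moves_for_candidate min_moves_for_candidate min_moves_for_candidate_alt
  have hpre' : 2 ≤ candidate.length := hpre
  have hlt1 : 1 < candidate.toList.length := by rw [String.length_toList]; omega
  have hlt0 : 0 < candidate.toList.length := by omega
  have h1 : PySem.Str.pyGet? candidate 1 = some (candidate.toList.getD 1 default) := by
    rw [show (1 : Int) = ((1 : Nat) : Int) from rfl, PySem.Str.pyGet?_natCast,
        List.getElem?_eq_getElem hlt1]
    simp [List.getD, List.getElem?_eq_getElem hlt1]
  have h0 : PySem.Str.pyGet? candidate 0 = some (candidate.toList.getD 0 default) := by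
    rw [show (0 : Int) = ((0 : Nat) : Int) from rfl, PySem.Str.pyGet?_natCast,
        List.getElem?_eq_getElem hlt0]
    simp [List.getD, List.getElem?_eq_getElem hlt0]
  set cs := s.toList with hcs
  set c1 := candidate.toList.getD 1 default with hc1
  set c0 := candidate.toList.getD 0 default with hc0
  rw [h0, h1]
  simp only [Option.getD_some]
  rw [aLoop_spec cs c1 0 cs.length le_rfl, bLoop_full cs c0 c1]
  have hslen : (s.length : Int) = (cs.length : Int) := by rw [hcs, String.length_toList]
  rcases lastIdx_cases cs c1 cs.length with hnone | ⟨hge, hlt⟩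
  · simp [hnone, bestSpec]
  · set p := lastIdx cs c1 cs.length with hp
    have hpne : ¬ (p = -1) := by omega
    simp only [hpne, if_false]
    rw [aLoop_spec cs c0 0 p.toNat (by omega)]
    have hbest : bestSpec cs c0 c1 cs.length = lastIdx cs c0 p.toNat := by
      simp only [bestSpec, ← hp, hpne, if_false]
    rw [hbest]
    rcases lastIdx_cases cs c0 p.toNat with h2none | ⟨h2ge, h2lt⟩
    · simp [h2none]
    · set q := lastIdx cs c0 p.toNat with hq
      have hqne : ¬ (q = -1) := by omega
      simp only [hqne, if_false]
      rw [hslen]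
      omega
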